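-- pv_equiv track=rewrite | github.com/frozenjava/swift_to_kotlin | kotlin_konverter.py | un_swiftify
-- ===== SOURCE A (Python) =====
-- def un_swiftify(string_to_unswift):
--     """
--     Replace switch key words with the holy Kotlin key words.
--     :param string_to_unswift: The string to replace stuff from
--     :return:
--     """
--     swift_to_kotlin_dict = {
--         'nil': 'null',
--         'Bool': 'Boolean',
--         'Decimal': 'Double',
--         'Int64': 'Int'
--     }
--
--     s = string_to_unswift
--     for swift_key, kotlin_value in swift_to_kotlin_dict.items():
--         s = str(s).replace(swift_key, kotlin_value)
--     return s
-- ===== SOURCE B (Python) =====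
-- def un_swiftify(string_to_unswift):
--     """
--     Replace switch key words with the holy Kotlin key words.
--     :param string_to_unswift: The string to replace stuff from
--     :return:
--     """
--     table = [('nil', 'null'), ('Bool', 'Boolean'), ('Decimal', 'Double'), ('Int64', 'Int')]
--
--     s = str(string_to_unswift)
--     out = []
--     i = 0
--     while i < len(s):
--         for key, val in table:
--             if s.startswith(key, i):
--                 out.append(val)
--                 i += len(key)
--                 break
--         else:
--             out.append(s[i])
--             i += 1
--     return ''.join(out)
-- ===== Notes on version B (the rewrite author's own statement) =====
-- stated objective: alternative
-- what changed: A makes four sequential full-string str.replace passes (one per dictionary entry); B does a single left-to-right scan that at each position tries the four keys in table order and emits either a replacement or the current character, which is valid because no replacement value contains a later key and no key occurrence can straddle a replacement boundary.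
import Mathlib
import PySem

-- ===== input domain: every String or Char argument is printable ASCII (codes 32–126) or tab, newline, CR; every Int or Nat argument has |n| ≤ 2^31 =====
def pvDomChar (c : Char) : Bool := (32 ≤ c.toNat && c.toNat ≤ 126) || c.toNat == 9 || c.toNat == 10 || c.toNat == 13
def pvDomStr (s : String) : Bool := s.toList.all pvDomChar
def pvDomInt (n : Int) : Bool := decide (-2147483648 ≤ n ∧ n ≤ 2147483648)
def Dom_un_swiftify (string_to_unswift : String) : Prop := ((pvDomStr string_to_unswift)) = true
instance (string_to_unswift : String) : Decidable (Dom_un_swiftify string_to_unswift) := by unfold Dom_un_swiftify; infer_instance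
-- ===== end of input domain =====

-- B replaces A's four sequential full-string replace passes with one left-to-right scan that
-- tries the four keys at each position (same key order); same return value, alternative single-pass structure.

-- ===== PORT A =====
def un_swiftify (string_to_unswift : String) : String :=
  let swift_to_kotlin_dict : PySem.Dict String String :=
    PySem.Dict.mk [("nil", "null"), ("Bool", "Boolean"), ("Decimal", "Double"), ("Int64", "Int")]
  swift_to_kotlin_dict.items.foldl
    (fun s kv => PySem.Str.replace s kv.1 kv.2) string_to_unswift

-- ===== PORT B =====
-- the table of Source B, each key split head/tail so keys are nonempty by construction
def kotlinTable : List (Char × List Char × List Char) :=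
  [('n', ['i', 'l'], ['n', 'u', 'l', 'l']),
   ('B', ['o', 'o', 'l'], ['B', 'o', 'o', 'l', 'e', 'a', 'n']),
   ('D', ['e', 'c', 'i', 'm', 'a', 'l'], ['D', 'o', 'u', 'b', 'l', 'e']),
   ('I', ['n', 't', '6', '4'], ['I', 'n', 't'])]

-- the inner `for key, val in table: if s.startswith(key, i)` loop of Source B
def findHit (tbl : List (Char × List Char × List Char)) (l : List Char) :
    Option (Nat × List Char) :=
  match tbl with
  | [] => none
  | (k, ks, v) :: rest =>
      if (k :: ks).isPrefixOf l then some (ks.length, v) else findHit rest l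

-- the outer `while i < len(s)` loop of Source B (advance by the matched key length, else copy one char)
def mscan (tbl : List (Char × List Char × List Char)) (l : List Char) : List Char :=
  match l with
  | [] => []
  | c :: t =>
    match findHit tbl (c :: t) with
    | some (n, v) => v ++ mscan tbl (t.drop n)
    | none => c :: mscan tbl t
termination_by l.length
decreasing_by all_goals (simp; try omega)

def un_swiftify_alt (string_to_unswift : String) : String :=
  String.ofList (mscan kotlinTable string_to_unswift.toList)

-- ===== PRECONDITION & SPEC =====
def Spec_un_swiftify (string_to_unswift : String) (out : String) : Prop := out = un_swiftify_alt string_to_unswift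
instance (string_to_unswift : String) (out : String) : Decidable (Spec_un_swiftify string_to_unswift out) := by unfold Spec_un_swiftify; infer_instance

-- ===== CLAIM (what is proved, stated in full; the proofs are below) =====
def Claim_equal_un_swiftify : Prop := ∀ (string_to_unswift : String), Dom_un_swiftify string_to_unswift → Spec_un_swiftify string_to_unswift (un_swiftify string_to_unswift)

-- ===== LEMMAS AND PROOFS =====

-- structural model of one Python str.replace pass with a nonempty pattern (o :: os)
def rep (o : Char) (os new : List Char) (l : List Char) : List Char :=
  match l with
  | [] => []
  | c :: t =>
      if (o :: os).isPrefixOf (c :: t) then new ++ rep o os new (t.drop os.length)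
      else c :: rep o os new t
termination_by l.length
decreasing_by all_goals (simp; try omega)

lemma replace_go_eq (o : Char) (os new : List Char) :
    ∀ (fuel : Nat) (l acc : List Char), l.length ≤ fuel →
      PySem.Chars.replace.go (o :: os) new fuel l acc = acc.reverse ++ rep o os new l := by
  intro fuel
  induction fuel with
  | zero =>
      intro l acc h
      have : l = [] := by cases l <;> simp_all
      subst this
      simp [PySem.Chars.replace.go, rep]
  | succ n ih =>
      intro l acc h
      cases l with
      | nil => simp [PySem.Chars.replace.go, rep]
      | cons c t =>
        rw [PySem.Chars.replace.go]
        by_cases hp : (o :: os).isPrefixOf (c :: t)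
        · have hd : List.drop (o :: os).length (c :: t) = t.drop os.length := by simp
          rw [if_pos hp, hd, ih _ _ (by simp at h ⊢; omega)]
          rw [rep, if_pos hp]
          simp
        · rw [if_neg hp, ih _ _ (by simp at h ⊢; omega)]
          rw [rep, if_neg hp]
          simp

lemma replace_eq (o : Char) (os new l : List Char) :
    PySem.Chars.replace l (o :: os) new = rep o os new l := by
  rw [PySem.Chars.replace]
  simp [replace_go_eq o os new l.length l [] le_rfl]

lemma mscan_nil (l : List Char) : mscan [] l = l := by
  induction l with
  | nil => rw [mscan]
  | cons c t ih => rw [mscan]; simp [findHit, ih]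

lemma prefix_append_cases {p v X : List Char} (h : p.isPrefixOf (v ++ X)) :
    p.isPrefixOf v = true ∨ v.isPrefixOf p = true := by
  rw [List.isPrefixOf_iff_prefix] at h ⊢
  rw [List.isPrefixOf_iff_prefix]
  exact List.prefix_or_prefix_of_prefix h (v.prefix_append X)

-- p and all its nonempty suffixes neither contain nor are contained (as prefixes) in any replacement value of tbl
def SuffCond (p : List Char) (tbl : List (Char × List Char × List Char)) : Prop :=
  ∀ q ∈ p.tails, q ≠ [] → ∀ e ∈ tbl, q.isPrefixOf e.2.2 = false ∧ e.2.2.isPrefixOf q = false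

lemma suffCond_tail {p₀ : Char} {p' : List Char} {tbl : List (Char × List Char × List Char)}
    (h : SuffCond (p₀ :: p') tbl) : SuffCond p' tbl := by
  intro q hq
  refine h q ?_
  rw [List.mem_tails] at hq ⊢
  exact hq.trans (List.suffix_cons p₀ p')

lemma isPrefixOf_cons (a : Char) (as : List Char) (b : Char) (bs : List Char) :
    (a :: as).isPrefixOf (b :: bs) = (a == b && as.isPrefixOf bs) := rfl

lemma findHit_some_mem {tbl : List (Char × List Char × List Char)} {l : List Char}
    {n : Nat} {v : List Char} (h : findHit tbl l = some (n, v)) :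
    ∃ e ∈ tbl, e.2.2 = v := by
  induction tbl with
  | nil => simp [findHit] at h
  | cons e rest ih =>
      obtain ⟨k, ks, w⟩ := e
      rw [findHit] at h
      by_cases hp : (k :: ks).isPrefixOf l
      · rw [if_pos hp] at h
        exact ⟨(k, ks, w), by simp, by simpa using congrArg (·.2) (Option.some.inj h)⟩
      · rw [if_neg hp] at h
        obtain ⟨e, he, hv⟩ := ih h
        exact ⟨e, by simp [he], hv⟩

lemma findHit_append_some {tbl tbl' : List (Char × List Char × List Char)} {l : List Char}
    {r : Nat × List Char} (h : findHit tbl l = some r) :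
    findHit (tbl ++ tbl') l = some r := by
  induction tbl with
  | nil => simp [findHit] at h
  | cons e rest ih =>
      obtain ⟨k, ks, w⟩ := e
      rw [findHit] at h
      rw [List.cons_append, findHit]
      by_cases hp : (k :: ks).isPrefixOf l
      · rw [if_pos hp] at h ⊢; exact h
      · rw [if_neg hp] at h ⊢; exact ih h

lemma findHit_append_none {tbl tbl' : List (Char × List Char × List Char)} {l : List Char}
    (h : findHit tbl l = none) :
    findHit (tbl ++ tbl') l = findHit tbl' l := by
  induction tbl with
  | nil => simp
  | cons e rest ih =>
      obtain ⟨k, ks, w⟩ := e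
      rw [findHit] at h
      rw [List.cons_append, findHit]
      by_cases hp : (k :: ks).isPrefixOf l
      · rw [if_pos hp] at h; exact absurd h (by simp)
      · rw [if_neg hp] at h; rw [if_neg hp]; exact ih h

lemma transfer (tbl : List (Char × List Char × List Char)) (u p : List Char)
    (h1 : SuffCond p tbl) (h2 : p.isPrefixOf u = false) :
    p.isPrefixOf (mscan tbl u) = false := by
  cases u with
  | nil =>
      cases p with
      | nil => simp [List.isPrefixOf] at h2
      | cons p₀ p' => rw [mscan]; simp [List.isPrefixOf]
  | cons c t =>
      cases p with
      | nil => simp [List.isPrefixOf] at h2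
      | cons p₀ p' =>
          rw [mscan]
          cases hf : findHit tbl (c :: t) with
          | some r =>
              obtain ⟨n, v⟩ := r
              obtain ⟨e, he, hv⟩ := findHit_some_mem hf
              have hc := h1 (p₀ :: p') (by rw [List.mem_tails]) (by simp) e he
              rw [hv] at hc
              by_contra hx
              rw [Bool.not_eq_false] at hx
              rcases prefix_append_cases hx with hcase | hcase
              · rw [hc.1] at hcase; exact Bool.false_ne_true hcase
              · rw [hc.2] at hcase; exact Bool.false_ne_true hcase
          | none =>
              rw [isPrefixOf_cons] at h2 ⊢
              rcases Bool.and_eq_false_iff.mp h2 with hb | hb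
              · rw [hb, Bool.false_and]
              · rw [transfer tbl t p' (suffCond_tail h1) hb, Bool.and_false]
termination_by u.length
decreasing_by subst_vars; simp; try omega

-- main lemma: one more replace pass on top of a scan = scan with one more key
lemma mscan_cons_some {tbl : List (Char × List Char × List Char)} {c : Char} {t : List Char}
    {n : Nat} {v : List Char} (h : findHit tbl (c :: t) = some (n, v)) :
    mscan tbl (c :: t) = v ++ mscan tbl (t.drop n) := by
  rw [mscan, h]

lemma mscan_cons_none {tbl : List (Char × List Char × List Char)} {c : Char} {t : List Char}
    (h : findHit tbl (c :: t) = none) :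
    mscan tbl (c :: t) = c :: mscan tbl t := by
  rw [mscan, h]

lemma rep_mscan (o : Char) (os new : List Char) (tbl : List (Char × List Char × List Char))
    (H1 : ∀ e ∈ tbl, ∀ X, rep o os new (e.2.2 ++ X) = e.2.2 ++ rep o os new X)
    (H2 : ∀ X, mscan tbl (os ++ X) = os ++ mscan tbl X)
    (H3 : SuffCond (o :: os) tbl) :
    ∀ u, rep o os new (mscan tbl u) = mscan (tbl ++ [(o, os, new)]) u := by
  intro u
  cases u with
  | nil => rw [mscan, mscan, rep]
  | cons c t =>
      cases hf : findHit tbl (c :: t) with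
      | some r =>
          obtain ⟨n, v⟩ := r
          obtain ⟨e, he, hv⟩ := findHit_some_mem hf
          have h1 := H1 e he
          rw [hv] at h1
          rw [mscan_cons_some hf, h1, rep_mscan o os new tbl H1 H2 H3 (t.drop n),
            mscan_cons_some (findHit_append_some hf)]
      | none =>
          by_cases hk : (o :: os).isPrefixOf (c :: t)
          · have hc : o = c := by
              rw [isPrefixOf_cons] at hk
              exact beq_iff_eq.mp (Bool.and_elim_left hk)
            have hos : os.isPrefixOf t := by
              rw [isPrefixOf_cons] at hk
              exact Bool.and_elim_right hk
            have htake : os = t.take os.length :=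
              List.prefix_iff_eq_take.mp (List.isPrefixOf_iff_prefix.mp hos)
            have ht' : os ++ t.drop os.length = t := by
              have h := t.take_append_drop os.length
              rw [← htake] at h
              exact h
            have hmt : mscan tbl t = os ++ mscan tbl (t.drop os.length) := by
              conv_lhs => rw [← ht']
              rw [H2]
            have hfe : findHit (tbl ++ [(o, os, new)]) (c :: t) = some (os.length, new) := by
              rw [findHit_append_none hf, findHit, if_pos hk]
            rw [mscan_cons_none hf, hmt, rep]
            have hmatch :
                (o :: os).isPrefixOf (c :: (os ++ mscan tbl (t.drop os.length))) = true := by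
              rw [isPrefixOf_cons, ← hc, beq_self_eq_true, Bool.true_and,
                List.isPrefixOf_iff_prefix]
              exact os.prefix_append _
            have hdrop2 : (os ++ mscan tbl (t.drop os.length)).drop os.length =
                mscan tbl (t.drop os.length) := by simp
            rw [if_pos hmatch, hdrop2, rep_mscan o os new tbl H1 H2 H3 (t.drop os.length),
              mscan_cons_some hfe]
          · have hnp : (o :: os).isPrefixOf (mscan tbl (c :: t)) = false :=
              transfer tbl (c :: t) (o :: os) H3 (Bool.eq_false_iff.mpr hk)
            rw [mscan_cons_none hf] at hnp
            have hfe : findHit (tbl ++ [(o, os, new)]) (c :: t) = none := by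
              rw [findHit_append_none hf, findHit, if_neg hk]
              rfl
            rw [mscan_cons_none hf, rep, if_neg (Bool.eq_false_iff.mp hnp),
              rep_mscan o os new tbl H1 H2 H3 t, mscan_cons_none hfe]
termination_by u => u.length
decreasing_by all_goals (subst_vars; simp; try omega)

-- the growing tables (prefixes of kotlinTable)
def tbl1 : List (Char × List Char × List Char) := [('n', ['i', 'l'], ['n', 'u', 'l', 'l'])]
def tbl2 : List (Char × List Char × List Char) :=
  tbl1 ++ [('B', ['o', 'o', 'l'], ['B', 'o', 'o', 'l', 'e', 'a', 'n'])]
def tbl3 : List (Char × List Char × List Char) :=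
  tbl2 ++ [('D', ['e', 'c', 'i', 'm', 'a', 'l'], ['D', 'o', 'u', 'b', 'l', 'e'])]

lemma pass1 (l : List Char) :
    rep 'n' ['i', 'l'] ['n', 'u', 'l', 'l'] l = mscan tbl1 l := by
  have h := rep_mscan 'n' ['i', 'l'] ['n', 'u', 'l', 'l'] []
    (by intro e he; simp at he)
    (by intro X; rw [mscan_nil, mscan_nil])
    (by intro q hq hne e he; simp at he) l
  rw [mscan_nil] at h
  exact h

lemma pass2 (l : List Char) :
    rep 'B' ['o', 'o', 'l'] ['B', 'o', 'o', 'l', 'e', 'a', 'n'] (mscan tbl1 l) = mscan tbl2 l := by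
  exact rep_mscan 'B' ['o', 'o', 'l'] ['B', 'o', 'o', 'l', 'e', 'a', 'n'] tbl1
    (by
      intro e he X
      simp only [tbl1, List.mem_singleton] at he
      subst he
      simp [rep, isPrefixOf_cons])
    (by intro X; simp [tbl1, mscan, findHit, isPrefixOf_cons])
    (by unfold SuffCond tbl1; decide) l

lemma pass3 (l : List Char) :
    rep 'D' ['e', 'c', 'i', 'm', 'a', 'l'] ['D', 'o', 'u', 'b', 'l', 'e'] (mscan tbl2 l) =
      mscan tbl3 l := by
  exact rep_mscan 'D' ['e', 'c', 'i', 'm', 'a', 'l'] ['D', 'o', 'u', 'b', 'l', 'e'] tbl2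
    (by
      intro e he X
      simp [tbl2, tbl1] at he
      rcases he with rfl | rfl <;> simp [rep, isPrefixOf_cons])
    (by intro X; simp [tbl2, tbl1, mscan, findHit, isPrefixOf_cons])
    (by unfold SuffCond tbl2 tbl1; decide) l

lemma pass4 (l : List Char) :
    rep 'I' ['n', 't', '6', '4'] ['I', 'n', 't'] (mscan tbl3 l) = mscan kotlinTable l := by
  have h := rep_mscan 'I' ['n', 't', '6', '4'] ['I', 'n', 't'] tbl3
    (by
      intro e he X
      simp [tbl3, tbl2, tbl1] at he
      rcases he with rfl | rfl | rfl <;> simp [rep, isPrefixOf_cons])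
    (by intro X; simp [tbl3, tbl2, tbl1, mscan, findHit, isPrefixOf_cons])
    (by unfold SuffCond tbl3 tbl2 tbl1; decide) l
  have ht : tbl3 ++ [('I', ['n', 't', '6', '4'], ['I', 'n', 't'])] = kotlinTable := by decide
  rw [ht] at h
  exact h

-- ===== VERDICT (by name: the statement is the Claim_ definition above) =====
theorem un_swiftify_spec : Claim_equal_un_swiftify := by
  intro s _
  unfold Spec_un_swiftify un_swiftify un_swiftify_alt
  simp only [List.foldl]
  have key :
      (PySem.Str.replace (PySem.Str.replace (PySem.Str.replace
        (PySem.Str.replace s "nil" "null") "Bool" "Boolean") "Decimal" "Double")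
        "Int64" "Int").toList = mscan kotlinTable s.toList := by
    rw [PySem.Str.toList_replace, PySem.Str.toList_replace, PySem.Str.toList_replace,
      PySem.Str.toList_replace]
    have e1 : "nil".toList = 'n' :: ['i', 'l'] := rfl
    have e2 : "null".toList = ['n', 'u', 'l', 'l'] := rfl
    have e3 : "Bool".toList = 'B' :: ['o', 'o', 'l'] := rfl
    have e4 : "Boolean".toList = ['B', 'o', 'o', 'l', 'e', 'a', 'n'] := rfl
    have e5 : "Decimal".toList = 'D' :: ['e', 'c', 'i', 'm', 'a', 'l'] := rfl
    have e6 : "Double".toList = ['D', 'o', 'u', 'b', 'l', 'e'] := rfl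
    have e7 : "Int64".toList = 'I' :: ['n', 't', '6', '4'] := rfl
    have e8 : "Int".toList = ['I', 'n', 't'] := rfl
    rw [e1, e2, e3, e4, e5, e6, e7, e8, replace_eq, replace_eq, replace_eq, replace_eq,
      pass1, pass2, pass3, pass4]
  calc PySem.Str.replace (PySem.Str.replace (PySem.Str.replace
        (PySem.Str.replace s "nil" "null") "Bool" "Boolean") "Decimal" "Double") "Int64" "Int"
      = String.ofList (PySem.Str.replace (PySem.Str.replace (PySem.Str.replace
          (PySem.Str.replace s "nil" "null") "Bool" "Boolean") "Decimal" "Double")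
          "Int64" "Int").toList := by rw [String.ofList_toList]
    _ = String.ofList (mscan kotlinTable s.toList) := by rw [key]
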